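-- pv_equiv track=rewrite | github.com/prakhar1989/WordCounter | app/utils.py | validate_word_count
-- ===== SOURCE A (Python) =====
-- from collections import Counter
--
-- def validate_word_count(text, words_excluded, words_returned):
--     cnt = Counter()
--     ignore_words = words_excluded.split()
--     for word in text.split():
--         if word not in ignore_words:
--             cnt[word] += 1
--     for word in cnt:
--         if  not words_returned.get(word) or \
--                 str(cnt[word]) != words_returned[word]:
--             return False
--     return True
-- ===== SOURCE B (Python) =====
-- def validate_word_count(text, words_excluded, words_returned):
--     # sort-then-group: count each kept word by scanning runs of the sorted list
--     ignore = set(words_excluded.split())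
--     kept = sorted(w for w in text.split() if w not in ignore)
--     i, n = 0, len(kept)
--     while i < n:
--         w = kept[i]
--         j = i + 1
--         while j < n and kept[j] == w:
--             j += 1
--         if words_returned.get(w) != str(j - i):
--             return False
--         i = j
--     return True
-- ===== Notes on version B (the rewrite author's own statement) =====
-- stated objective: alternative
-- what changed: Counts are obtained by sorting the filtered word list and scanning runs of equal words (sort+groupby) instead of building a Counter hash map, and the ignore list becomes a set probed once per word.
import Mathlib
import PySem

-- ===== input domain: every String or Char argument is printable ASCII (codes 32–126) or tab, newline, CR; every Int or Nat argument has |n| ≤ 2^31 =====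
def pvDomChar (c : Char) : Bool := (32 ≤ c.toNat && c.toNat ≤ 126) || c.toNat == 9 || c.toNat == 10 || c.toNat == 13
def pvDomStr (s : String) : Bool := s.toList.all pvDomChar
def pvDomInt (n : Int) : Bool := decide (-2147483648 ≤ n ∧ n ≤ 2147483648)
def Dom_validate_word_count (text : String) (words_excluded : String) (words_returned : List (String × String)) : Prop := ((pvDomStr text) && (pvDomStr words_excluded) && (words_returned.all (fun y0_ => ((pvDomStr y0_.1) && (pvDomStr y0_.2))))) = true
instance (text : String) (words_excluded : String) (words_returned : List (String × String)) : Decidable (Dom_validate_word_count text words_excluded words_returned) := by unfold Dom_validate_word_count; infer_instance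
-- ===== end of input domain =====

-- B replaces A's Counter hash-count by sort-then-scan-runs over the filtered word list (alternative
-- algorithm, same observable behaviour); equivalence of the return value is proved for all inputs.

-- ===== PORT A =====
-- literal port of A: Counter built by a filtered fold, then every counted word checked
-- against words_returned (dict.get = first match in the association list; '' is falsy)
def validate_word_count (text : String) (words_excluded : String) (words_returned : List (String × String)) : Bool :=
  let ignore_words := PySem.Str.split₀ words_excluded
  let cnt := (PySem.Str.split₀ text).foldl
      (fun d w => if ignore_words.contains w then d else d.modify w 0 (· + 1))
      (PySem.Dict.empty : PySem.Dict String Int)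
  cnt.keys.all (fun w =>
    !(match words_returned.lookup w with
      | none => true                                  -- words_returned.get(word) is None: falsy
      | some v => (v == "") || !(PySem.Int.toStr (cnt.getD w 0) == v)))

-- ===== PORT B =====
-- the inner while loop of Source B: scan the run of words equal to kept[i] (j advances while equal),
-- check its length against words_returned.get, continue at i = j (the remainder after the run)
def vwcRuns (words_returned : List (String × String)) : List String → Bool
  | [] => true
  | w :: rest =>
    let run := rest.takeWhile (fun x => x == w)
    if words_returned.lookup w == some (PySem.Int.toStr ((run.length : Int) + 1)) then
      vwcRuns words_returned (rest.dropWhile (fun x => x == w))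
    else false
termination_by s => s.length
decreasing_by
  have := List.length_dropWhile_le (p := fun x => x == w) (l := rest); simp; omega

def validate_word_count_alt (text : String) (words_excluded : String) (words_returned : List (String × String)) : Bool :=
  let ignore := PySem.Set.ofList (PySem.Str.split₀ words_excluded)
  let kept := PySem.List.sorted
      ((PySem.Str.split₀ text).filter (fun w => !(PySem.Set.contains ignore w)))
      (fun x => x) false
  vwcRuns words_returned kept

-- ===== PRECONDITION & SPEC =====
def Spec_validate_word_count (text : String) (words_excluded : String) (words_returned : List (String × String)) (out : Bool) : Prop := out = validate_word_count_alt text words_excluded words_returned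
instance (text : String) (words_excluded : String) (words_returned : List (String × String)) (out : Bool) : Decidable (Spec_validate_word_count text words_excluded words_returned out) := by unfold Spec_validate_word_count; infer_instance

-- ===== CLAIM (what is proved, stated in full; the proofs are below) =====
def Claim_equal_validate_word_count : Prop := ∀ (text : String) (words_excluded : String) (words_returned : List (String × String)), Dom_validate_word_count text words_excluded words_returned → Spec_validate_word_count text words_excluded words_returned (validate_word_count text words_excluded words_returned)

-- ===== LEMMAS AND PROOFS =====

-- str(n) is never the empty string
lemma vwc_toStr_ne_empty (n : Int) : PySem.Int.toStr n ≠ "" := by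
  intro h
  have h1 : (PySem.Int.toStr n).toList = [] := by rw [h]; rfl
  rw [PySem.Int.toList_toStr] at h1
  unfold PySem.Int.toChars at h1
  split at h1
  · simp at h1
  · have : 0 < (Nat.toDigits 10 n.toNat).length := Nat.length_toDigits_pos
    simp [h1] at this

-- the shared characterisation: every kept word maps to the string of its count
def vwcGood (words_returned : List (String × String)) (F : List String) : Prop :=
  ∀ w ∈ F, words_returned.lookup w = some (PySem.Int.toStr (F.count w))

-- B's run scan on a sorted list checks exactly vwcGood
lemma vwcRuns_iff (wr : List (String × String)) :
    ∀ (n : Nat) (s : List String), s.length ≤ n → s.Pairwise (· ≤ ·) →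
      (vwcRuns wr s = true ↔ vwcGood wr s) := by
  intro n
  induction n with
  | zero =>
    intro s hs _
    have : s = [] := List.eq_nil_of_length_eq_zero (Nat.le_zero.mp hs)
    subst this
    simp [vwcRuns, vwcGood]
  | succ n ih =>
    intro s hs hp
    cases s with
    | nil => simp [vwcRuns, vwcGood]
    | cons w rest =>
      have hple : ∀ x ∈ rest, w ≤ x := fun x hx => (List.pairwise_cons.mp hp).1 x hx
      have hprest : rest.Pairwise (· ≤ ·) := (List.pairwise_cons.mp hp).2
      set run := rest.takeWhile (fun x => x == w) with hrun
      set rest' := rest.dropWhile (fun x => x == w) with hrest'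
      have hsplit : run ++ rest' = rest := List.takeWhile_append_dropWhile
      have hrunw : ∀ x ∈ run, x = w := by
        intro x hx
        have := List.mem_takeWhile_imp hx
        simpa using this
      have hprest' : rest'.Pairwise (· ≤ ·) :=
        hprest.sublist (List.dropWhile_sublist (fun x => x == w))
      have hwnot : w ∉ rest' := by
        intro hw
        cases hhead : rest' with
        | nil => simp [hhead] at hw
        | cons h t =>
          have hh : ((fun x => x == w) h) = false := by
            have := List.head_dropWhile_not (fun x => x == w) (l := rest) (by simp [← hrest', hhead])
            simpa [← hrest', hhead] using this
          have hhw : h ≠ w := by simpa using hh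
          have hmemrest : ∀ x ∈ rest', x ∈ rest := fun x hx => by
            rw [← hsplit]; exact List.mem_append_right _ hx
          rcases (List.mem_cons.mp (by simpa [hhead] using hw)) with h1 | h2
          · exact hhw h1.symm
          · -- w in tail t, so h ≤ w by pairwise of rest'; and w ≤ h; so h = w
            have hp2 : (h :: t).Pairwise (· ≤ ·) := hhead ▸ hprest'
            have hle1 : h ≤ w := (List.pairwise_cons.mp hp2).1 w h2
            have hle2 : w ≤ h := hple h (hmemrest h (by simp [hhead]))
            exact hhw (le_antisymm hle1 hle2)
      have hcount_run : run.count w = run.length := by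
        rw [List.count_eq_length]
        intro x hx; exact ((hrunw x hx) ▸ rfl)
      have hcount_w : (w :: rest).count w = run.length + 1 := by
        rw [List.count_cons_self, ← hsplit, List.count_append, hcount_run,
            List.count_eq_zero.mpr hwnot]
      have hcount_x : ∀ x ∈ rest', (w :: rest).count x = rest'.count x := by
        intro x hx
        have hxw : x ≠ w := fun h => hwnot (h ▸ hx)
        have hxrun : x ∉ run := fun h => hxw (hrunw x h)
        rw [List.count_cons_of_ne hxw.symm, ← hsplit, List.count_append,
            List.count_eq_zero.mpr hxrun, Nat.zero_add]
      have hmem : ∀ x, x ∈ (w :: rest) ↔ x = w ∨ x ∈ rest' := by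
        intro x
        constructor
        · intro hx
          rcases List.mem_cons.mp hx with h | h
          · exact Or.inl h
          · rw [← hsplit] at h
            rcases List.mem_append.mp h with h | h
            · exact Or.inl (hrunw x h)
            · exact Or.inr h
        · rintro (rfl | h)
          · exact List.mem_cons_self
          · exact List.mem_cons_of_mem _ (by rw [← hsplit]; exact List.mem_append_right _ h)
      have hlen : rest'.length ≤ n := by
        have h1 := List.length_dropWhile_le (p := fun x => x == w) (l := rest)
        have h2 : rest.length + 1 ≤ n + 1 := by simpa [List.length_cons] using hs
        have h3 : rest'.length ≤ rest.length := hrest' ▸ h1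
        omega
      have hih := ih rest' hlen hprest'
      rw [vwcRuns]
      simp only [← hrun, ← hrest']
      constructor
      · intro h
        split at h
        · next hcond =>
          have hcond' : wr.lookup w = some (PySem.Int.toStr ((run.length : Int) + 1)) := by
            simpa using hcond
          intro x hx
          rcases (hmem x).mp hx with rfl | hx'
          · rw [hcount_w]
            have hc : ((run.length + 1 : Nat) : Int) = (run.length : Int) + 1 := by push_cast; ring
            rw [hc]; exact hcond'
          · rw [hcount_x x hx']
            exact (hih.mp h) x hx'
        · exact absurd h (by simp)
      · intro h
        have hcond : wr.lookup w = some (PySem.Int.toStr ((run.length : Int) + 1)) := by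
          have := h w ((hmem w).mpr (Or.inl rfl))
          rw [hcount_w] at this
          have hc : ((run.length + 1 : Nat) : Int) = (run.length : Int) + 1 := by push_cast; ring
          rw [hc] at this; exact this
        rw [if_pos (by simpa using hcond)]
        exact hih.mpr (fun x hx => by
          rw [← hcount_x x hx]
          exact h x ((hmem x).mpr (Or.inr hx)))

-- A's per-key check, for a key with positive count, is the vwcGood condition
lemma vwc_A_cond (wr : List (String × String)) (c : Int) (w : String) :
    (!(match wr.lookup w with
       | none => true
       | some v => (v == "") || !(PySem.Int.toStr c == v))) = true ↔
      wr.lookup w = some (PySem.Int.toStr c) := by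
  cases h : wr.lookup w with
  | none => simp
  | some v =>
    simp only [Bool.not_eq_eq_eq_not, Bool.not_true, Bool.or_eq_false_iff, Option.some.injEq]
    constructor
    · rintro ⟨_, h2⟩
      have : PySem.Int.toStr c = v := by simpa using h2
      exact this.symm
    · rintro rfl
      exact ⟨by simpa using vwc_toStr_ne_empty c, by simp⟩

-- the two filtered word lists coincide (list membership vs. set membership)
lemma vwc_filter_eq (W ign : List String) :
    W.filter (fun w => !(PySem.Set.contains (PySem.Set.ofList ign) w)) =
    W.filter (fun w => !ign.contains w) := by
  apply List.filter_congr
  intro w _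
  have : PySem.Set.contains (PySem.Set.ofList ign) w = ign.contains w := by
    by_cases h : w ∈ ign
    · simp [PySem.Set.contains_eq_listContains, h, (PySem.Set.mem_ofList ign w).mpr h]
    · simp [PySem.Set.contains_eq_listContains, h]
  rw [this]

-- vwcGood is invariant under permutation
lemma vwcGood_perm (wr : List (String × String)) {s t : List String} (hp : s.Perm t) :
    vwcGood wr s ↔ vwcGood wr t := by
  unfold vwcGood
  constructor
  · intro h w hw; rw [← hp.count_eq]; exact h w (hp.mem_iff.mpr hw)
  · intro h w hw; rw [hp.count_eq]; exact h w (hp.mem_iff.mp hw)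

-- ===== VERDICT (by name: the statement is the Claim_ definition above) =====
theorem validate_word_count_spec : Claim_equal_validate_word_count := by
  intro text words_excluded wr _
  unfold Spec_validate_word_count
  simp only [validate_word_count, validate_word_count_alt]
  set W := PySem.Str.split₀ text with hW
  set ign := PySem.Str.split₀ words_excluded with hign
  set F := W.filter (fun w => !ign.contains w) with hF
  -- A's fold is the Counter of the filtered word list
  have hfold : W.foldl (fun d w => if ign.contains w then d else d.modify w 0 (· + 1))
      (PySem.Dict.empty : PySem.Dict String Int) = PySem.Dict.counter F := by
    rw [PySem.Dict.counter_eq_foldl, hF, ← PySem.List.foldl_if_eq_foldl_filter]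
    exact PySem.List.foldl_congr_mem W _ _ _
      (fun acc x _ => by cases h : ign.contains x <;> simp)

  rw [hfold, PySem.Dict.keys_counter]
  -- B's filtered list is F
  rw [vwc_filter_eq W ign]
  set kept := PySem.List.sorted F (fun x => x) false with hkept
  rw [Bool.eq_iff_iff]
  have hperm : kept.Perm F := PySem.List.sorted_perm F (fun x => x) false
  constructor
  · intro h
    rw [(vwcRuns_iff wr kept.length kept le_rfl
          (PySem.List.sorted_pairwise F (fun x => x))), vwcGood_perm wr hperm]
    intro w hw
    have := (List.all_eq_true.mp h) w ((PySem.Set.mem_ofList F w).mpr hw)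
    rw [PySem.Dict.getD_counter] at this
    exact (vwc_A_cond wr (F.count w) w).mp this
  · intro h
    have hg : vwcGood wr F := by
      rw [← vwcGood_perm wr hperm]
      exact (vwcRuns_iff wr kept.length kept le_rfl
          (PySem.List.sorted_pairwise F (fun x => x))).mp h
    apply List.all_eq_true.mpr
    intro w hw
    rw [PySem.Dict.getD_counter]
    exact (vwc_A_cond wr (F.count w) w).mpr (hg w ((PySem.Set.mem_ofList F w).mp hw))
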